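-- pv_equiv track=rewrite | github.com/HaruParo/ConsciousBuyer | conscious-cart-coach/src/data_processing/seasonal_regional.py | _group_seasons
-- ===== SOURCE A (Python) =====
-- def _group_seasons(month_statuses: list[tuple[int, str]]) -> list[tuple[int, int, str]]:
--     """Group consecutive months with same status into ranges."""
--     if not month_statuses:
--         return []
--
--     ranges = []
--     start_month = month_statuses[0][0]
--     current_status = month_statuses[0][1]
--     prev_month = start_month
--
--     for month, status in month_statuses[1:]:
--         # Check if consecutive and same status
--         is_consecutive = (month == prev_month + 1) or (prev_month == 12 and month == 1)
--         if is_consecutive and status == current_status: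
--             prev_month = month
--         else:
--             # Close current range
--             ranges.append((start_month, prev_month, current_status))
--             start_month = month
--             current_status = status
--             prev_month = month
--
--     # Close final range
--     ranges.append((start_month, prev_month, current_status))
--
--     return ranges
-- ===== SOURCE B (Python) =====
-- def _group_seasons(month_statuses: list[tuple[int, str]]) -> list[tuple[int, int, str]]:
--     """Group consecutive months with same status into ranges (run-by-run scan)."""
--     ranges = []
--     i, n = 0, len(month_statuses)
--     while i < n:
--         j = i + 1
--         while j < n:
--             prev_m = month_statuses[j - 1][0]
--             m, s = month_statuses[j]
--             if (m == prev_m + 1 or (prev_m == 12 and m == 1)) and s == month_statuses[i][1]: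
--                 j += 1
--             else:
--                 break
--         ranges.append((month_statuses[i][0], month_statuses[j - 1][0], month_statuses[i][1]))
--         i = j
--     return ranges
-- ===== Notes on version B (the rewrite author's own statement) =====
-- stated objective: alternative
-- what changed: Replaces A's single fused loop carrying (start, prev, status) accumulator state with a run-by-run decomposition: an outer loop takes one maximal consecutive same-status run at a time via an inner scan, emitting its range directly.
import Mathlib
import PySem

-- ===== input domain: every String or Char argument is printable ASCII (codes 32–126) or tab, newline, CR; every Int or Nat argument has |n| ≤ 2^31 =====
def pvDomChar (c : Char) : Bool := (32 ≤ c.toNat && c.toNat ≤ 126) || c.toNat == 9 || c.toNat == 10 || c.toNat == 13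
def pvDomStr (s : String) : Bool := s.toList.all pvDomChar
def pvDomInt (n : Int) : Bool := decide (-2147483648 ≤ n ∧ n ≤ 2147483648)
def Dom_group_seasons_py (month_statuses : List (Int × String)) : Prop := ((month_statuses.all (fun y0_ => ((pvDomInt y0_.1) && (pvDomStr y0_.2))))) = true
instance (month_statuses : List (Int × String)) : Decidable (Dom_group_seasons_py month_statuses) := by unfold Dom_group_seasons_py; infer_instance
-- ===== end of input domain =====

-- B replaces A's fused accumulator loop by a run-by-run decomposition (alternative, same cost).

-- ===== PORT A =====
-- A's for-loop over month_statuses[1:] with state (ranges, start_month, current_status, prev_month)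
def groupSeasonsALoop : List (Int × String) → List (Int × Int × String) → Int → String → Int → List (Int × Int × String)
  | [], ranges, start, cur, prev => ranges ++ [(start, prev, cur)]
  | (m, s) :: rest, ranges, start, cur, prev =>
      if ((m == prev + 1) || (prev == 12 && m == 1)) && s == cur then
        groupSeasonsALoop rest ranges start cur m
      else
        groupSeasonsALoop rest (ranges ++ [(start, prev, cur)]) m s m

def group_seasons_py (month_statuses : List (Int × String)) : List (Int × Int × String) :=
  match month_statuses with
  | [] => []
  | (m, s) :: rest => groupSeasonsALoop rest [] m s m

-- ===== PORT B =====
-- B's inner while: consume the rest of the current run; returns (last month of run, leftover)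
def groupSeasonsTakeRun : Int → String → List (Int × String) → Int × List (Int × String)
  | prev, _cur, [] => (prev, [])
  | prev, cur, (m, s) :: rest =>
      if ((m == prev + 1) || (prev == 12 && m == 1)) && s == cur then
        groupSeasonsTakeRun m cur rest
      else
        (prev, (m, s) :: rest)

theorem groupSeasonsTakeRun_length (prev : Int) (cur : String) (rest : List (Int × String)) :
    (groupSeasonsTakeRun prev cur rest).2.length ≤ rest.length := by
  induction rest generalizing prev with
  | nil => simp [groupSeasonsTakeRun]
  | cons p rest ih =>
      obtain ⟨m, s⟩ := p
      simp only [groupSeasonsTakeRun]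
      split
      · exact le_trans (ih m) (Nat.le_succ _)
      · simp

-- B's outer while: one range per run
def group_seasons_py_alt (month_statuses : List (Int × String)) : List (Int × Int × String) :=
  match month_statuses with
  | [] => []
  | (m, s) :: rest =>
      let r := groupSeasonsTakeRun m s rest
      (m, r.1, s) :: group_seasons_py_alt r.2
termination_by month_statuses.length
decreasing_by
  exact Nat.lt_succ_of_le (groupSeasonsTakeRun_length m s rest)

-- ===== PRECONDITION & SPEC =====
def Spec_group_seasons_py (month_statuses : List (Int × String)) (out : List (Int × Int × String)) : Prop := out = group_seasons_py_alt month_statuses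
instance (month_statuses : List (Int × String)) (out : List (Int × Int × String)) : Decidable (Spec_group_seasons_py month_statuses out) := by unfold Spec_group_seasons_py; infer_instance

-- ===== CLAIM (what is proved, stated in full; the proofs are below) =====
def Claim_equal_group_seasons_py : Prop := ∀ (month_statuses : List (Int × String)), Dom_group_seasons_py month_statuses → Spec_group_seasons_py month_statuses (group_seasons_py month_statuses)

-- ===== LEMMAS AND PROOFS =====

theorem group_seasons_py_alt_nil : group_seasons_py_alt [] = [] := by
  rw [group_seasons_py_alt.eq_def]

theorem group_seasons_py_alt_cons (m : Int) (s : String) (rest : List (Int × String)) :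
    group_seasons_py_alt ((m, s) :: rest) =
      (m, (groupSeasonsTakeRun m s rest).1, s) ::
        group_seasons_py_alt (groupSeasonsTakeRun m s rest).2 := by
  rw [group_seasons_py_alt.eq_def]

theorem groupSeasonsALoop_eq (rest : List (Int × String)) :
    ∀ (ranges : List (Int × Int × String)) (start : Int) (cur : String) (prev : Int),
      groupSeasonsALoop rest ranges start cur prev =
        ranges ++ ((start, (groupSeasonsTakeRun prev cur rest).1, cur) ::
          group_seasons_py_alt (groupSeasonsTakeRun prev cur rest).2) := by
  induction rest with
  | nil =>
      intro ranges start cur prev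
      simp [groupSeasonsALoop, groupSeasonsTakeRun, group_seasons_py_alt_nil]
  | cons p rest ih =>
      intro ranges start cur prev
      obtain ⟨m, s⟩ := p
      simp only [groupSeasonsALoop, groupSeasonsTakeRun]
      split
      · exact ih ranges start cur m
      · rw [ih (ranges ++ [(start, prev, cur)]) m s m]
        simp [group_seasons_py_alt]

-- ===== VERDICT (by name: the statement is the Claim_ definition above) =====
theorem group_seasons_py_spec : Claim_equal_group_seasons_py := by
  intro ms _
  unfold Spec_group_seasons_py
  match ms with
  | [] => simp [group_seasons_py, group_seasons_py_alt_nil]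
  | (m, s) :: rest =>
      simp only [group_seasons_py, groupSeasonsALoop_eq, List.nil_append]
      rw [group_seasons_py_alt_cons]
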